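-- pv_equiv track=rewrite | github.com/monijuan/leetcode_python | code/competition/2022/PTA2022/006.py | oneSide2Highest
-- ===== SOURCE A (Python) =====
-- def oneSide2Highest(height):
--     resh, resw = 0, 0
--     highest = 0
--     stack = []
--     for now in height:
--         if now<highest:
--             stack.append(now)
--         else:
--             w=0
--             for h in stack:
--                 w+=1
--                 resh = max(resh, min(now,highest)-h)
--             resw+=1
--             stack = [now]   # 注意，这个最高点之后还会用到
--             highest = now
--     return resh,resw,stack
-- ===== SOURCE B (Python) =====
-- def oneSide2Highest(height):
--     resh, resw = 0, 0
--     highest = 0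
--     stack = []
--     lo = None  # running minimum of the current stack
--     for now in height:
--         if now < highest:
--             stack.append(now)
--             lo = now if lo is None else min(lo, now)
--         else:
--             if stack:
--                 resh = max(resh, highest - lo)
--             resw += 1
--             stack = [now]
--             lo = now
--             highest = now
--     return resh, resw, stack
-- ===== Notes on version B (the rewrite author's own statement) =====
-- stated objective: simpler
-- what changed: B maintains a running minimum of the current stack, so each flush does one max with (highest - running_min) instead of rescanning the whole stack with an inner loop (and min(now,highest) simplifies to highest since the flush branch has now >= highest).
import Mathlib
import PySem

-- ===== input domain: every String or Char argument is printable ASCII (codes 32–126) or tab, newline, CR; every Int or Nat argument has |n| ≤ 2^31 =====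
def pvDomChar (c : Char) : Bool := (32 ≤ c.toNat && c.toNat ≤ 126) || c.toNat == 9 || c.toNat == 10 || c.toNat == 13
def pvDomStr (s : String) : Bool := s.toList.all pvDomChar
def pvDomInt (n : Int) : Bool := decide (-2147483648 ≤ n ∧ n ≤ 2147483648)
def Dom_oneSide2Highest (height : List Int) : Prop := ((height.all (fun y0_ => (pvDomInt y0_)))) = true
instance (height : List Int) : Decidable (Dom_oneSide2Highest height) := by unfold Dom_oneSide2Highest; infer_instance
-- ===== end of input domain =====

-- B replaces A's inner rescan of the stack at each flush by a running minimum of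
-- the current stack, maintained alongside it (objective: simpler, same amortized cost).

-- ===== PORT A =====
-- one iteration of A's outer loop; the inner 'for h in stack' is the foldl over stack
def stepA (st : Int × Int × Int × List Int) (now : Int) : Int × Int × Int × List Int :=
  match st with
  | (resh, resw, highest, stack) =>
    if now < highest then
      (resh, resw, highest, stack ++ [now])
    else
      let p := stack.foldl (fun (p : Int × Int) h => (p.1 + 1, max p.2 (min now highest - h)))
                 ((0 : Int), resh)
      (p.2, resw + 1, now, [now])

def oneSide2Highest (height : List Int) : Int × Int × List Int :=
  match height.foldl stepA (0, 0, 0, []) with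
  | (resh, resw, _, stack) => (resh, resw, stack)

-- ===== PORT B =====
-- one iteration of B's loop; the extra Option Int is the running minimum 'lo'
-- 'lo = now if lo is None else min(lo, now)'
def updLo (lo : Option Int) (now : Int) : Option Int :=
  match lo with
  | none => some now
  | some l => some (min l now)

-- 'if stack: resh = max(resh, highest - lo)'
def flushResh (resh highest : Int) (stack : List Int) (lo : Option Int) : Int :=
  match stack, lo with
  | [], _ => resh
  | _ :: _, none => resh
  | _ :: _, some l => max resh (highest - l)

def stepB (st : Int × Int × Int × List Int × Option Int) (now : Int) :
    Int × Int × Int × List Int × Option Int :=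
  match st with
  | (resh, resw, highest, stack, lo) =>
    if now < highest then
      (resh, resw, highest, stack ++ [now], updLo lo now)
    else
      (flushResh resh highest stack lo, resw + 1, now, [now], some now)

def oneSide2Highest_alt (height : List Int) : Int × Int × List Int :=
  match height.foldl stepB (0, 0, 0, [], none) with
  | (resh, resw, _, stack, _) => (resh, resw, stack)

-- ===== PRECONDITION & SPEC =====
def Spec_oneSide2Highest (height : List Int) (out : Int × Int × List Int) : Prop := out = oneSide2Highest_alt height
instance (height : List Int) (out : Int × Int × List Int) : Decidable (Spec_oneSide2Highest height out) := by unfold Spec_oneSide2Highest; infer_instance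

-- ===== CLAIM (what is proved, stated in full; the proofs are below) =====
def Claim_equal_oneSide2Highest : Prop := ∀ (height : List Int), Dom_oneSide2Highest height → Spec_oneSide2Highest height (oneSide2Highest height)

-- ===== LEMMAS AND PROOFS =====

-- the minimum B tracks, as a function of the stack (none iff empty; foldl-min otherwise)
def optLo : List Int → Option Int
  | [] => none
  | h :: t => some (t.foldl min h)

def mapA (st : Int × Int × Int × List Int) : Int × Int × Int × List Int × Option Int :=
  (st.1, st.2.1, st.2.2.1, st.2.2.2, optLo st.2.2.2)

lemma foldl_min_assoc (t : List Int) : ∀ a b : Int,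
    t.foldl min (min a b) = min a (t.foldl min b) := by
  induction t with
  | nil => intro a b; simp
  | cons y t ih =>
    intro a b
    simp only [List.foldl_cons, min_assoc]
    exact ih a (min b y)

lemma snd_inner_fold (c : Int) (s : List Int) : ∀ (w r : Int),
    (s.foldl (fun (p : Int × Int) h => (p.1 + 1, max p.2 (c - h))) (w, r)).2
      = s.foldl (fun r h => max r (c - h)) r := by
  induction s with
  | nil => intro w r; rfl
  | cons h t ih => intro w r; simpa using ih (w + 1) (max r (c - h))

lemma inner_fold_min (c : Int) (t : List Int) : ∀ (h r : Int),
    List.foldl (fun r x => max r (c - x)) r (h :: t)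
      = max r (c - t.foldl min h) := by
  induction t with
  | nil => intro h r; simp
  | cons x t ih =>
    intro h r
    have e1 : List.foldl (fun r x => max r (c - x)) r (h :: x :: t)
        = List.foldl (fun r x => max r (c - x)) (max r (c - h)) (x :: t) := rfl
    rw [e1, ih x (max r (c - h))]
    have e2 : (x :: t).foldl min h = min h (t.foldl min x) := by
      simpa using foldl_min_assoc t h x
    rw [e2]
    omega

lemma step_commute (st : Int × Int × Int × List Int) (now : Int) :
    stepB (mapA st) now = mapA (stepA st now) := by
  obtain ⟨resh, resw, highest, stack⟩ := st
  by_cases hlt : now < highest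
  · -- append branch: the running min follows the stack
    cases stack with
    | nil => simp [stepA, stepB, mapA, optLo, updLo, hlt]
    | cons h t =>
      simp [stepA, stepB, mapA, optLo, updLo, hlt, List.foldl_append]
  · -- flush branch
    cases stack with
    | nil => simp [stepA, stepB, mapA, optLo, flushResh, hlt]
    | cons h t =>
      simp only [stepA, stepB, mapA, optLo, flushResh, hlt, ite_false]
      refine Prod.ext ?_ rfl
      rw [snd_inner_fold, inner_fold_min]
      simp only []
      omega

lemma fold_commute (hs : List Int) : ∀ st : Int × Int × Int × List Int,
    hs.foldl stepB (mapA st) = mapA (hs.foldl stepA st) := by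
  induction hs with
  | nil => intro st; rfl
  | cons x hs ih =>
    intro st
    simp only [List.foldl_cons, step_commute, ih]

-- ===== VERDICT (by name: the statement is the Claim_ definition above) =====
theorem oneSide2Highest_spec : Claim_equal_oneSide2Highest := by
  intro height _
  unfold Spec_oneSide2Highest oneSide2Highest oneSide2Highest_alt
  have h0 : ((0 : Int), (0 : Int), (0 : Int), ([] : List Int), (none : Option Int))
      = mapA (0, 0, 0, []) := rfl
  rw [h0, fold_commute]
  obtain ⟨r, w, hg, s⟩ := height.foldl stepA (0, 0, 0, [])
  rfl
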